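-- pv_equiv track=rewrite | github.com/Nghia03092004/nghia03092004.github.io | project_euler_unified/problem_611/solution.py | count_square_step_ways
-- ===== SOURCE A (Python) =====
-- def count_square_step_ways(n):
--     """Count ordered ways to sum to n using perfect squares."""
--     dp = [0] * (n + 1)
--     dp[0] = 1
--     for i in range(1, n + 1):
--         k = 1
--         while k * k <= i:
--             dp[i] += dp[i - k * k]
--             k += 1
--     return dp[n]
-- ===== SOURCE B (Python) =====
-- def count_square_step_ways(n):
--     """Count ordered ways to sum to n using perfect squares.
--
--     Top-down demand-driven memoization: values are computed on an explicit
--     stack, with a dict memo filled only when all square-step predecessors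
--     of the top entry are known.
--     """
--     memo = {0: 1}
--     stack = [n]
--     while stack:
--         i = stack[-1]
--         if i in memo:
--             stack.pop()
--             continue
--         k = 1
--         total = 0
--         missing = None
--         while k * k <= i:
--             c = i - k * k
--             if c in memo:
--                 total += memo[c]
--                 k += 1
--             else:
--                 missing = c
--                 break
--         if missing is None:
--             memo[i] = total
--             stack.pop()
--         else:
--             stack.append(missing)
--     return memo[n]
-- ===== Notes on version B (the rewrite author's own statement) =====
-- stated objective: alternative
-- what changed: Replaced the bottom-up array DP (filling the whole table in index order) by top-down demand-driven memoization: an explicit work stack plus a dict memo, where a value is computed only once all its square-step predecessors have been memoized; same O(n^1.5) work, different control structure and data structure (dict+stack vs array).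
import Mathlib
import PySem

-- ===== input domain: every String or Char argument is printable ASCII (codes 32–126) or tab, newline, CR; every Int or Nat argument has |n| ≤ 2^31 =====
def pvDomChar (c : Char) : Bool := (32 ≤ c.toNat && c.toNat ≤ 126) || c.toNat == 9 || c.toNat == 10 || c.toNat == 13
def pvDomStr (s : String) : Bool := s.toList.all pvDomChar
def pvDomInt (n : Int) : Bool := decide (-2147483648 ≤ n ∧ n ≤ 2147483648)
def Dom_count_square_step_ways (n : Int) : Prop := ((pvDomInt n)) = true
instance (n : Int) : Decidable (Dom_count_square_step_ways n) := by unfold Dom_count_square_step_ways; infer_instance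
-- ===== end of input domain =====

-- B replaces A's bottom-up array DP by top-down demand-driven memoization
-- (explicit work stack + dict memo): an alternative algorithmic structure, equal cost.


-- ===== PORT A =====
-- A's inner loop: 'while k*k <= i: dp[i] += dp[i-k*k]; k += 1'
-- (the Python list dp is an Array Int; indices are always in range, so
--  setIfInBounds/[·]? are exact here)
def innerA (dp : Array Int) (i k : Nat) : Array Int :=
  if _h : k * k ≤ i then
    innerA (dp.setIfInBounds i (dp[i]?.getD 0 + dp[i - k * k]?.getD 0)) i (k + 1)
  else dp
termination_by i + 1 - k
decreasing_by
  rcases Nat.eq_zero_or_pos k with rfl | hk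
  · omega
  · have := Nat.le_mul_of_pos_left k hk
    omega

def count_square_step_ways (n : Int) : Int :=
  let N := n.toNat
  let dp0 := (Array.replicate (N + 1) (0 : Int)).setIfInBounds 0 1
  let dp := (List.range N).foldl (fun dp j => innerA dp (j + 1) 1) dp0
  dp[N]?.getD 0

-- ===== PORT B =====
-- B's inner scan: 'k=1; total=0; missing=None; while k*k <= i: c = i-k*k;
--   if c in memo: total += memo[c]; k += 1 else: missing = c; break'
def scanB (fuel : Nat) (d : Std.HashMap Int Int) (i : Int) (k : Nat) (total : Int) :
    Int × Option Int :=
  match fuel with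
  | 0 => (total, none)
  | fuel + 1 =>
    if (k : Int) * (k : Int) ≤ i then
      match d[i - (k : Int) * (k : Int)]? with
      | some v => scanB fuel d i (k + 1) (total + v)
      | none => (total, some (i - (k : Int) * (k : Int)))
    else (total, none)

-- B's outer loop: 'while stack: i = stack[-1]; …'; the fuel argument only makes the
-- recursion structurally total — the proofs show it is never exhausted.
def loopB (fuel : Nat) (d : Std.HashMap Int Int) (stack : List Int) : Std.HashMap Int Int :=
  match fuel, stack with
  | 0, _ => d
  | _ + 1, [] => d
  | fuel + 1, i :: rest =>
    match d[i]? with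
    | some _ => loopB fuel d rest
    | none =>
      match scanB (i.toNat + 1) d i 1 0 with
      | (total, none) => loopB fuel (d.insert i total) rest
      | (_, some c) => loopB fuel d (c :: i :: rest)

def count_square_step_ways_alt (n : Int) : Int :=
  let memo := loopB (2 * n.toNat + 2) ((∅ : Std.HashMap Int Int).insert 0 1) [n]
  memo.getD n 0

-- ===== PRECONDITION & SPEC =====
-- Python A raises IndexError for negative n (the initial table write hits an empty list).
def Pre_count_square_step_ways (n : Int) : Prop := 0 ≤ n
instance (n : Int) : Decidable (Pre_count_square_step_ways n) := by unfold Pre_count_square_step_ways; infer_instance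
def pvWitness_count_square_step_ways : Int := 5

def Spec_count_square_step_ways (n : Int) (out : Int) : Prop := out = count_square_step_ways_alt n
instance (n : Int) (out : Int) : Decidable (Spec_count_square_step_ways n out) := by unfold Spec_count_square_step_ways; infer_instance

-- ===== CLAIM (what is proved, stated in full; the proofs are below) =====
def Claim_equal_count_square_step_ways : Prop := ∀ (n : Int), Dom_count_square_step_ways n → Pre_count_square_step_ways n → Spec_count_square_step_ways n (count_square_step_ways n)

-- ===== LEMMAS AND PROOFS =====

-- the common specification: f i = number of ordered compositions of i into positive squares
def fAux (i k : Nat) : Int :=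
  if _h : k * k ≤ i then
    (if h0 : i - k * k = 0 then 1 else fAux (i - k * k) 1) + fAux i (k + 1)
  else 0
termination_by (i, i + 1 - k)
decreasing_by
  · rcases Nat.eq_zero_or_pos k with rfl | hk
    · simp only [Nat.zero_mul, Nat.sub_zero] at *
      exact Prod.Lex.right _ (by omega)
    · exact Prod.Lex.left _ _ (by have := Nat.le_mul_of_pos_left k hk; omega)
  · rcases Nat.eq_zero_or_pos k with rfl | hk
    · exact Prod.Lex.right _ (by omega)
    · have := Nat.le_mul_of_pos_left k hk
      exact Prod.Lex.right _ (by omega)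

def f (i : Nat) : Int := if i = 0 then 1 else fAux i 1

theorem fAux_zero (i k : Nat) (h : ¬ k * k ≤ i) : fAux i k = 0 := by
  rw [fAux, dif_neg h]

theorem getD_set_ne_pv (l : List Int) {i j : Nat} (x : Int) (h : i ≠ j) :
    (l.set i x).getD j 0 = l.getD j 0 := by
  simp [List.getD_eq_getElem?_getD, List.getElem?_set_ne h]

theorem getD_set_self_pv (l : List Int) {i : Nat} (x : Int) (h : i < l.length) :
    (l.set i x).getD i 0 = x := by
  simp [List.getD_eq_getElem?_getD, h]

theorem set_getD_self_pv (l : List Int) {i : Nat} (h : i < l.length) :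
    l.set i (l.getD i 0) = l := by
  simp [List.getD_eq_getElem?_getD, List.getElem?_eq_getElem h]

-- list-level mirror of port A's inner loop, used only by the proofs
def innerAL (dp : List Int) (i k : Nat) : List Int :=
  if _h : k * k ≤ i then
    innerAL (dp.set i (dp.getD i 0 + dp.getD (i - k * k) 0)) i (k + 1)
  else dp
termination_by i + 1 - k
decreasing_by
  rcases Nat.eq_zero_or_pos k with rfl | hk
  · omega
  · have := Nat.le_mul_of_pos_left k hk
    omega

theorem innerA_toList (i : Nat) : ∀ t k (dp : Array Int), i + 1 - k = t →
    (innerA dp i k).toList = innerAL dp.toList i k := by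
  intro t
  induction t with
  | zero =>
    intro k dp ht
    have hnot : ¬ k * k ≤ i := by
      rcases Nat.eq_zero_or_pos k with rfl | hk
      · omega
      · have := Nat.le_mul_of_pos_left k hk
        omega
    rw [innerA, dif_neg hnot, innerAL, dif_neg hnot]
  | succ t ih =>
    intro k dp ht
    by_cases hcond : k * k ≤ i
    · have hdec : i + 1 - (k + 1) = t := by
        rcases Nat.eq_zero_or_pos k with rfl | hk
        · omega
        · have := Nat.le_mul_of_pos_left k hk
          omega
      have harg : (dp.setIfInBounds i (dp[i]?.getD 0 + dp[i - k * k]?.getD 0)).toList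
          = dp.toList.set i (dp.toList.getD i 0 + dp.toList.getD (i - k * k) 0) := by
        rw [Array.toList_setIfInBounds,
          show dp.toList.getD i 0 + dp.toList.getD (i - k * k) 0
              = dp[i]?.getD 0 + dp[i - k * k]?.getD 0 from by
            simp [List.getD_eq_getElem?_getD, Array.getElem?_toList]]
      rw [innerA, dif_pos hcond, innerAL, dif_pos hcond, ih (k + 1) _ hdec, harg]
    · rw [innerA, dif_neg hcond, innerAL, dif_neg hcond]

theorem foldlA_toList : ∀ (l : List Nat) (init : Array Int),
    (l.foldl (fun dp j => innerA dp (j + 1) 1) init).toList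
      = l.foldl (fun dp j => innerAL dp (j + 1) 1) init.toList := by
  intro l
  induction l with
  | nil => intro init; rfl
  | cons x xs ih =>
    intro init
    rw [List.foldl_cons, List.foldl_cons, ih, innerA_toList (x + 1) _ 1 init rfl]

theorem innerAL_char (i : Nat) : ∀ t k dp, i + 1 - k = t → 1 ≤ k → i < dp.length →
    (∀ j, j < i → dp.getD j 0 = f j) →
    innerAL dp i k = dp.set i (dp.getD i 0 + fAux i k) := by
  intro t
  induction t with
  | zero =>
    intro k dp ht hk hlen _
    have hnot : ¬ k * k ≤ i := by
      have := Nat.le_mul_of_pos_left k hk; omega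
    rw [innerAL, dif_neg hnot, fAux_zero i k hnot, add_zero, set_getD_self_pv dp hlen]
  | succ t ih =>
    intro k dp ht hk hlen hdp
    by_cases hcond : k * k ≤ i
    · have hkk1 : 1 ≤ k * k := Nat.mul_pos hk hk
      have hlt : i - k * k < i := by omega
      rw [innerAL, dif_pos hcond]
      have hlen' : i < (dp.set i (dp.getD i 0 + dp.getD (i - k * k) 0)).length := by
        simpa using hlen
      have hdp' : ∀ j, j < i →
          (dp.set i (dp.getD i 0 + dp.getD (i - k * k) 0)).getD j 0 = f j := by
        intro j hj
        rw [getD_set_ne_pv _ _ (by omega : i ≠ j)]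
        exact hdp j hj
      rw [ih (k + 1) _ (by omega) (by omega) hlen' hdp']
      rw [getD_set_self_pv _ _ hlen, List.set_set]
      have hunf : fAux i k = f (i - k * k) + fAux i (k + 1) := by
        rw [fAux, dif_pos hcond, dite_eq_ite, f]
      rw [hunf, hdp _ hlt, add_assoc]
    · rw [innerAL, dif_neg hcond, fAux_zero i k hcond, add_zero, set_getD_self_pv dp hlen]

theorem dp0_getD (N j : Nat) (hj : j ≤ N) :
    ((List.replicate (N + 1) (0 : Int)).set 0 1).getD j 0 = if j = 0 then 1 else 0 := by
  by_cases h0 : j = 0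
  · subst h0
    simp [List.getD_eq_getElem?_getD]
  · rw [if_neg h0]
    simp [List.getD_eq_getElem?_getD, List.getElem_set_ne, List.getElem_replicate,
      Ne.symm h0, Nat.lt_succ_of_le hj]

theorem invA (N : Nat) : ∀ m, m ≤ N →
    ((List.range m).foldl (fun dp j => innerAL dp (j + 1) 1)
        ((List.replicate (N + 1) (0 : Int)).set 0 1)).length = N + 1 ∧
    ∀ j, j ≤ N → ((List.range m).foldl (fun dp j => innerAL dp (j + 1) 1)
        ((List.replicate (N + 1) (0 : Int)).set 0 1)).getD j 0 = if j ≤ m then f j else 0 := by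
  intro m
  induction m with
  | zero =>
    intro _
    simp only [List.range_zero, List.foldl_nil]
    refine ⟨by simp, fun j hj => ?_⟩
    rw [dp0_getD N j hj]
    by_cases h0 : j = 0
    · subst h0; simp [f]
    · rw [if_neg h0, if_neg (by omega)]
  | succ m ih =>
    intro hm
    obtain ⟨hlen, hinv⟩ := ih (by omega)
    rw [List.range_succ, List.foldl_append]
    simp only [List.foldl_cons, List.foldl_nil]
    set L := (List.range m).foldl (fun dp j => innerAL dp (j + 1) 1)
      ((List.replicate (N + 1) (0 : Int)).set 0 1) with hL
    have hm1len : m + 1 < L.length := by omega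
    have hprev : ∀ j, j < m + 1 → L.getD j 0 = f j := by
      intro j hj
      rw [hinv j (by omega), if_pos (by omega)]
    rw [innerAL_char (m + 1) _ 1 L rfl le_rfl hm1len hprev]
    refine ⟨by simpa using hlen, fun j hj => ?_⟩
    by_cases hjm : j = m + 1
    · subst hjm
      rw [getD_set_self_pv _ _ hm1len, hinv _ hj, if_neg (by omega), if_pos le_rfl]
      rw [show f (m + 1) = fAux (m + 1) 1 from by rw [f, if_neg (by omega)]]
      ring
    · rw [getD_set_ne_pv _ _ (fun e => hjm e.symm), hinv j hj]
      rw [if_congr (show (j ≤ m) ↔ (j ≤ m + 1) from by omega) (rfl : f j = f j)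
        (rfl : (0:Int) = 0)]

theorem A_eq_f (N : Nat) : count_square_step_ways (N : Int) = f N := by
  show ((List.range (N:Int).toNat).foldl (fun dp j => innerA dp (j + 1) 1)
      ((Array.replicate ((N:Int).toNat + 1) (0 : Int)).setIfInBounds 0 1))[(N:Int).toNat]?.getD 0
      = f N
  rw [Int.toNat_natCast]
  have hbr : ((List.range N).foldl (fun dp j => innerA dp (j + 1) 1)
      ((Array.replicate (N + 1) (0 : Int)).setIfInBounds 0 1)).toList
      = (List.range N).foldl (fun dp j => innerAL dp (j + 1) 1)
        ((List.replicate (N + 1) (0 : Int)).set 0 1) := by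
    rw [foldlA_toList, Array.toList_setIfInBounds, Array.toList_replicate]
  rw [show (((List.range N).foldl (fun dp j => innerA dp (j + 1) 1)
      ((Array.replicate (N + 1) (0 : Int)).setIfInBounds 0 1))[N]?.getD 0)
      = ((List.range N).foldl (fun dp j => innerA dp (j + 1) 1)
      ((Array.replicate (N + 1) (0 : Int)).setIfInBounds 0 1)).toList.getD N 0 from by
    simp [List.getD_eq_getElem?_getD, Array.getElem?_toList]]
  rw [hbr, (invA N N le_rfl).2 N le_rfl, if_pos le_rfl]

-- ===== B-side proofs =====

-- invariant: the memo dict holds exactly f on 0..t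
def GoodT (t : Nat) (d : Std.HashMap Int Int) : Prop :=
  ∀ j : Int, d[j]? = if 0 ≤ j ∧ j ≤ (t : Int) then some (f j.toNat) else none

theorem Good_zero : GoodT 0 ((∅ : Std.HashMap Int Int).insert 0 1) := by
  intro j
  rw [Std.HashMap.getElem?_insert]
  by_cases h : j = (0 : Int)
  · subst h
    rw [if_pos (by simp), if_pos (by omega)]
    simp [f]
  · rw [if_neg (by simpa using fun e => h e.symm), Std.HashMap.getElem?_empty,
      if_neg (by omega)]

theorem Good_insert (t : Nat) (d : Std.HashMap Int Int) (hd : GoodT t d) :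
    GoodT (t + 1) (d.insert ((t : Int) + 1) (f (t + 1))) := by
  intro j
  rw [Std.HashMap.getElem?_insert]
  by_cases h : j = (t : Int) + 1
  · subst h
    rw [if_pos (by simp), if_pos (show (0:Int) ≤ (t:Int) + 1 ∧ (t:Int) + 1 ≤ ((t + 1 : Nat) : Int)
      from by push_cast; omega)]
    have hcast : ((t : Int) + 1).toNat = t + 1 := by omega
    rw [hcast]
  · rw [if_neg (by simpa using fun e => h e.symm), hd j]
    have : (0 ≤ j ∧ j ≤ (t : Int)) ↔ (0 ≤ j ∧ j ≤ ((t + 1 : Nat) : Int)) := by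
      push_cast
      omega
    rw [if_congr this rfl rfl]

theorem scan_complete (t : Nat) (d : Std.HashMap Int Int) (hd : GoodT t d) :
    ∀ fuel k total, 1 ≤ k → t + 2 - k ≤ fuel →
      scanB fuel d ((t : Int) + 1) k total = (total + fAux (t + 1) k, none) := by
  intro fuel
  induction fuel with
  | zero =>
    intro k total hk hf
    have hnot : ¬ (k * k ≤ t + 1) := by
      have : k ≤ k * k := Nat.le_mul_of_pos_left k hk
      omega
    rw [scanB, fAux_zero (t + 1) k hnot, add_zero]
  | succ fuel ih =>
    intro k total hk hf
    rw [scanB]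
    by_cases hcond : (k : Int) * (k : Int) ≤ (t : Int) + 1
    · have hkk1 : 1 ≤ k * k := Nat.mul_pos hk hk
      have hcondN : k * k ≤ t + 1 := by push_cast at hcond; omega
      have hc0 : (0 : Int) ≤ (t : Int) + 1 - (k : Int) * (k : Int) := by omega
      have hct : (t : Int) + 1 - (k : Int) * (k : Int) ≤ (t : Int) := by omega
      have hget : d[(t : Int) + 1 - (k : Int) * (k : Int)]?
          = some (f ((t : Int) + 1 - (k : Int) * (k : Int)).toNat) := by
        rw [hd, if_pos ⟨hc0, hct⟩]
      have htn : ((t : Int) + 1 - (k : Int) * (k : Int)).toNat = t + 1 - k * k := by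
        omega
      rw [if_pos hcond, hget]
      dsimp only
      rw [ih (k + 1) (total + f ((t : Int) + 1 - (k : Int) * (k : Int)).toNat)
        (by omega) (by omega)]
      have hunf : fAux (t + 1) k = f (t + 1 - k * k) + fAux (t + 1) (k + 1) := by
        rw [fAux, dif_pos hcondN, dite_eq_ite, f]
      rw [hunf, htn, add_assoc]
    · rw [if_neg hcond,
        fAux_zero (t + 1) k (by omega), add_zero]

theorem scan_missing (t : Nat) (d : Std.HashMap Int Int) (i : Int) (fuel : Nat)
    (hd : GoodT t d) (hi : (t : Int) + 1 < i) :
    scanB (fuel + 1) d i 1 0 = (0, some (i - 1)) := by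
  rw [scanB, if_pos (by push_cast; omega)]
  have hnone : d[i - ((1 : Nat) : Int) * ((1 : Nat) : Int)]? = none := by
    rw [hd, if_neg (by push_cast; omega)]
  rw [hnone]
  norm_num

-- the stack chain [a, a+1, …, a+len-1] (head = stack top)
def chainB (a len : Nat) : List Int := (List.range len).map (fun x => ((a + x : Nat) : Int))

theorem chainB_cons (a c : Nat) : chainB a (c + 1) = ((a : Nat) : Int) :: chainB (a + 1) c := by
  simp only [chainB, List.range_succ_eq_map, List.map_cons, List.map_map, Nat.add_zero]
  refine congrArg (List.cons _) (List.map_congr_left ?_)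
  intro x _
  simp only [Function.comp_apply]
  have hx : a + x.succ = a + 1 + x := by omega
  rw [hx]

theorem chainB_snoc (a c : Nat) :
    chainB a (c + 1) = chainB a c ++ [((a + c : Nat) : Int)] := by
  simp [chainB, List.range_succ]

theorem descend (t : Nat) : ∀ (c : Nat), ∀ (d : Std.HashMap Int Int) fuel rest, GoodT t d →
    loopB (fuel + c) d (((t + 1 + c : Nat) : Int) :: rest)
      = loopB fuel d (chainB (t + 1) (c + 1) ++ rest) := by
  intro c
  induction c with
  | zero =>
    intro d fuel rest _
    rw [chainB_cons]
    simp [chainB]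
  | succ c ih =>
    intro d fuel rest hd
    have hget : d[((t + 1 + (c + 1) : Nat) : Int)]? = none := by
      rw [hd, if_neg (by push_cast; omega)]
    have hc : ((t + 1 + (c + 1) : Nat) : Int) - 1 = ((t + 1 + c : Nat) : Int) := by
      push_cast; omega
    rw [show fuel + (c + 1) = (fuel + c) + 1 from by omega, loopB, hget,
      scan_missing t d _ _ hd (by push_cast; omega)]
    dsimp only
    rw [hc, ih d fuel (((t + 1 + (c + 1) : Nat) : Int) :: rest) hd]
    rw [chainB_snoc (t + 1) (c + 1), List.append_assoc, List.singleton_append]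

theorem ascend : ∀ (c : Nat), ∀ (t : Nat) (d : Std.HashMap Int Int) fuel rest, GoodT t d →
    ∃ d', loopB (fuel + c) d (chainB (t + 1) c ++ rest) = loopB fuel d' rest
      ∧ GoodT (t + c) d' := by
  intro c
  induction c with
  | zero =>
    intro t d fuel rest hd
    exact ⟨d, by simp [chainB], by simpa using hd⟩
  | succ c ih =>
    intro t d fuel rest hd
    rw [chainB_cons]
    have hget : d[((t + 1 : Nat) : Int)]? = none := by
      rw [hd, if_neg (by push_cast; omega)]
    have hscan : scanB (((t + 1 : Nat) : Int).toNat + 1) d ((t + 1 : Nat) : Int) 1 0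
        = (0 + fAux (t + 1) 1, none) := by
      rw [show ((t + 1 : Nat) : Int) = (t : Int) + 1 from by push_cast; ring]
      refine scan_complete t d hd _ 1 0 le_rfl ?_
      omega
    rw [List.cons_append, show fuel + (c + 1) = (fuel + c) + 1 from by omega, loopB, hget,
      hscan]
    dsimp only
    have hins : d.insert ((t + 1 : Nat) : Int) (0 + fAux (t + 1) 1)
        = d.insert ((t : Int) + 1) (f (t + 1)) := by
      have h1 : ((t + 1 : Nat) : Int) = (t : Int) + 1 := by push_cast; ring
      have h2 : (0 : Int) + fAux (t + 1) 1 = f (t + 1) := by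
        rw [f, if_neg (by omega), zero_add]
      rw [h1, h2]
    rw [hins]
    obtain ⟨d', hrun, hgood⟩ := ih (t + 1) _ fuel rest (Good_insert t d hd)
    exact ⟨d', by rw [hrun], by rwa [show t + 1 + c = t + (c + 1) from by omega] at hgood⟩

theorem B_eq_f (N : Nat) : count_square_step_ways_alt (N : Int) = f N := by
  show (loopB (2 * (N : Int).toNat + 2) ((∅ : Std.HashMap Int Int).insert 0 1)
      [(N : Int)]).getD (N : Int) 0 = f N
  rw [Int.toNat_natCast]
  rcases Nat.eq_zero_or_pos N with rfl | hN
  · have h0 : ((∅ : Std.HashMap Int Int).insert 0 1)[(((0 : Nat) : Int))]? = some (f 0) := by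
      rw [Good_zero ((0 : Nat) : Int), if_pos (by simp)]
      norm_num
    rw [show (2 * 0 + 2 : Nat) = 1 + 1 from rfl, loopB, h0]
    dsimp only
    rw [show loopB 1 ((∅ : Std.HashMap Int Int).insert 0 1) [] =
      ((∅ : Std.HashMap Int Int).insert 0 1) from rfl]
    rw [Std.HashMap.getD_eq_getD_getElem?, h0]
    rfl
  · have h1 : loopB (2 * N + 2) ((∅ : Std.HashMap Int Int).insert 0 1) [((N : Nat) : Int)]
        = loopB (N + 3) ((∅ : Std.HashMap Int Int).insert 0 1) (chainB 1 N ++ []) := by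
      have := descend 0 (N - 1) ((∅ : Std.HashMap Int Int).insert 0 1) (N + 3) [] Good_zero
      rw [show (0 + 1 + (N - 1) : Nat) = N from by omega,
        show (N + 3) + (N - 1) = 2 * N + 2 from by omega,
        show (0 + 1 : Nat) = 1 from rfl, show (N - 1) + 1 = N from by omega] at this
      exact this
    obtain ⟨d', hrun, hgood⟩ := ascend N 0 ((∅ : Std.HashMap Int Int).insert 0 1) 3 [] Good_zero
    rw [h1, show N + 3 = 3 + N from by omega, hrun]
    have hfin : loopB 3 d' [] = d' := rfl
    rw [hfin, Std.HashMap.getD_eq_getD_getElem?, hgood ((N : Nat) : Int),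
      if_pos (by constructor <;> [positivity; simp])]
    simp

-- ===== VERDICT (by name: the statement is the Claim_ definition above) =====
theorem count_square_step_ways_spec : Claim_equal_count_square_step_ways := by
  intro n _ hpre
  have h0 : (0 : Int) ≤ n := hpre
  show count_square_step_ways n = count_square_step_ways_alt n
  have hn : n = ((n.toNat : Nat) : Int) := by omega
  rw [hn, A_eq_f, B_eq_f]
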